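-- pv_equiv track=rewrite | github.com/elite-coder-5150/data-structures-the-fun-way | python/count_cycles.py | cycles
-- ===== SOURCE A (Python) =====
-- def cycles(n):
--     fact = 1
--     result = n - 1
--
--     i = result
--
--     while (i > 0):
--         fact = fact * i
--         i -= 1
--
--     return fact // 2
-- ===== SOURCE B (Python) =====
-- def cycles(n):
--     def prod(lo, hi):
--         # product of the integers lo..hi (1 if the range is empty)
--         if lo > hi:
--             return 1
--         if lo == hi:
--             return lo
--         mid = (lo + hi) // 2
--         return prod(lo, mid) * prod(mid + 1, hi)
--     return prod(1, n - 1) // 2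
-- ===== Notes on version B (the rewrite author's own statement) =====
-- stated objective: alternative
-- what changed: Replaces A's sequential while-loop factorial by a recursive divide-and-conquer product of the range 1..n-1 (balanced multiplications, O(log n) recursion depth), then // 2.
import Mathlib
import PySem

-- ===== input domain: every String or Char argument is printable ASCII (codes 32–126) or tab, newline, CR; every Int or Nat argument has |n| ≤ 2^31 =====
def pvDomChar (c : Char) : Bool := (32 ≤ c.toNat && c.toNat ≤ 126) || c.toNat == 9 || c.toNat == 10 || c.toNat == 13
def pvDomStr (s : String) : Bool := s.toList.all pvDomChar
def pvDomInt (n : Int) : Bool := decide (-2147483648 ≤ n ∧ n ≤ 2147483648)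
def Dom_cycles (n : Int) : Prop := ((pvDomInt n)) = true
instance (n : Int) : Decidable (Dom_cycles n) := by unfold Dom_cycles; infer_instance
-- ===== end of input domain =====

-- B replaces A's sequential while-loop factorial by a divide-and-conquer range product
-- (balanced multiplications, O(log n) recursion depth); same return value for every n.

-- ===== PORT A =====
-- A's while loop: while i > 0: fact = fact * i; i -= 1
def cyclesLoop (fact i : Int) : Int :=
  if i > 0 then cyclesLoop (fact * i) (i - 1) else fact
termination_by i.toNat
decreasing_by omega

def cycles (n : Int) : Int :=
  PySem.Int.floordiv (cyclesLoop 1 (n - 1)) 2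

-- ===== PORT B =====
-- midpoint bounds, used by prodRange's termination proof
theorem pvMidBounds (a b : Int) (h : a < b) :
    a ≤ PySem.Int.floordiv (a + b) 2 ∧ PySem.Int.floordiv (a + b) 2 < b :=
  ⟨(PySem.Int.le_floordiv_iff_mul_le (by omega)).2 (by omega),
   (PySem.Int.floordiv_lt_iff_lt_mul (by omega)).2 (by omega)⟩

-- product of the integers lo..hi (1 if the range is empty), split at the midpoint
def prodRange (lo hi : Int) : Int :=
  if _h1 : lo > hi then 1
  else if _h2 : lo = hi then lo
  else
    let mid := PySem.Int.floordiv (lo + hi) 2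
    prodRange lo mid * prodRange (mid + 1) hi
termination_by (hi - lo).toNat
decreasing_by
  · have := pvMidBounds lo hi (by omega); omega
  · have := pvMidBounds lo hi (by omega); omega

def cycles_alt (n : Int) : Int :=
  PySem.Int.floordiv (prodRange 1 (n - 1)) 2

-- ===== PRECONDITION & SPEC =====
def Spec_cycles (n : Int) (out : Int) : Prop := out = cycles_alt n
instance (n : Int) (out : Int) : Decidable (Spec_cycles n out) := by unfold Spec_cycles; infer_instance

-- ===== CLAIM (what is proved, stated in full; the proofs are below) =====
def Claim_equal_cycles : Prop := ∀ (n : Int), Dom_cycles n → Spec_cycles n (cycles n)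

-- ===== LEMMAS AND PROOFS =====
theorem iccProd_empty (lo hi : Int) (h : hi < lo) : (∏ x ∈ Finset.Icc lo hi, x) = 1 := by
  rw [Finset.Icc_eq_empty (by omega), Finset.prod_empty]

theorem iccProd_split (lo mid hi : Int) (h1 : lo ≤ mid) (h2 : mid < hi) :
    (∏ x ∈ Finset.Icc lo hi, x) = (∏ x ∈ Finset.Icc lo mid, x) * ∏ x ∈ Finset.Icc (mid + 1) hi, x := by
  rw [← Finset.prod_union (by
    simp only [Finset.disjoint_left, Finset.mem_Icc]; intro x hx hx2; omega)]
  congr 1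
  ext x; simp only [Finset.mem_union, Finset.mem_Icc]; omega

theorem iccProd_succ_top (lo hi : Int) (h : lo ≤ hi) :
    (∏ x ∈ Finset.Icc lo hi, x) = (∏ x ∈ Finset.Icc lo (hi - 1), x) * hi := by
  have h2 : Finset.Icc lo hi = insert hi (Finset.Icc lo (hi - 1)) := by
    ext x; simp only [Finset.mem_Icc, Finset.mem_insert]; omega
  rw [h2, Finset.prod_insert (by simp)]
  ring

theorem prodRange_eq_iccProd (lo hi : Int) :
    prodRange lo hi = ∏ x ∈ Finset.Icc lo hi, x := by
  induction lo, hi using prodRange.induct with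
  | case1 lo hi h =>
    rw [prodRange, dif_pos h, iccProd_empty lo hi (by omega)]
  | case2 hi h =>
    rw [prodRange, dif_neg h, dif_pos rfl, Finset.Icc_self, Finset.prod_singleton]
  | case3 lo hi h1 h2 mid ih1 ih2 =>
    have hb := pvMidBounds lo hi (by omega)
    rw [prodRange, dif_neg h1, dif_neg h2]
    show prodRange lo mid * prodRange (mid + 1) hi = _
    rw [ih1, ih2, ← iccProd_split lo mid hi (by omega) (by omega)]

theorem cyclesLoop_eq_aux (m : Nat) :
    ∀ i fact : Int, i.toNat = m → cyclesLoop fact i = fact * ∏ x ∈ Finset.Icc 1 i, x := by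
  induction m with
  | zero =>
    intro i fact h
    rw [cyclesLoop, if_neg (by omega), iccProd_empty 1 i (by omega)]
    ring
  | succ m ih =>
    intro i fact h
    rw [cyclesLoop, if_pos (by omega), ih (i - 1) _ (by omega),
      iccProd_succ_top 1 i (by omega)]
    ring

-- ===== VERDICT (by name: the statement is the Claim_ definition above) =====
theorem cycles_spec : Claim_equal_cycles := by
  intro n _
  unfold Spec_cycles cycles cycles_alt
  rw [cyclesLoop_eq_aux (n - 1).toNat (n - 1) 1 rfl, one_mul, prodRange_eq_iccProd]
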